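-- pv_equiv track=rewrite | github.com/cocacolachicken/english2braille-api | grade2Translator/test.py | arrayWordOrSign
-- ===== SOURCE A (Python) =====
-- def arrayWordOrSign(string):
--     # define and init vars
--     arr = []
--     i = 0
--     currentWord = ""
--     currentTuple = (True,"")
--     wordCheck = False
--     if string[0].isalpha():
--         wordCheck = True
--     count = 0
--
--     # separate words and punctuation/digits
--     while i<len(string):
--         if string[i] == '\'' or string[i].isalpha():
--             if wordCheck:
--                 currentWord += string[i]
--             else:
--                 currentTuple = (False, currentWord)
--                 arr.append(currentTuple)  # append the word
--                 wordCheck = True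
--                 count+=1
--                 currentWord = string[i]
--         else:
--             if wordCheck:
--                 currentTuple = (True, currentWord)
--                 arr.append(currentTuple)  # append the word
--                 wordCheck = False
--                 count += 1
--                 currentWord = string[i]
--             else:
--                 currentWord += string[i]
--         if i == len(string) - 1:
--             currentTuple = (wordCheck, currentWord)
--             arr.append(currentTuple)  # append the word
--         i += 1
--     return arr
-- ===== SOURCE B (Python) =====
-- def arrayWordOrSign(string):
--     # Run-splitting by key: peel off the maximal leading run of same-class chars,
--     # emit (key, run), repeat.  No mutable state machine, no end-of-string special case.
--     def wordish(c):
--         return c == "'" or c.isalpha()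
--     arr = []
--     rest = string
--     while rest:
--         key = wordish(rest[0])
--         n = 1
--         while n < len(rest) and wordish(rest[n]) == key:
--             n += 1
--         arr.append((key, rest[:n]))
--         rest = rest[n:]
--     return arr
-- ===== Notes on version B (the rewrite author's own statement) =====
-- stated objective: simpler
-- what changed: Replaced A's per-character state machine (wordCheck/currentWord/end-of-string special case) with a run-splitting loop that repeatedly peels the maximal leading run of same-class characters and emits (key, run) as one slice, avoiding A's per-character string concatenation.
-- intended difference: On strings whose first character is an apostrophe A returns a spurious leading (False, "") pair (wordCheck is initialised from isalpha only, while the loop treats ' as word-class) before the correct segments; B returns just the true segmentation, which is the intended word/non-word run list. — e.g. on arrayWordOrSign("'a"): A returns [(false, ""), (true, "'a")], B returns [(true, "'a")]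
import Mathlib
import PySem

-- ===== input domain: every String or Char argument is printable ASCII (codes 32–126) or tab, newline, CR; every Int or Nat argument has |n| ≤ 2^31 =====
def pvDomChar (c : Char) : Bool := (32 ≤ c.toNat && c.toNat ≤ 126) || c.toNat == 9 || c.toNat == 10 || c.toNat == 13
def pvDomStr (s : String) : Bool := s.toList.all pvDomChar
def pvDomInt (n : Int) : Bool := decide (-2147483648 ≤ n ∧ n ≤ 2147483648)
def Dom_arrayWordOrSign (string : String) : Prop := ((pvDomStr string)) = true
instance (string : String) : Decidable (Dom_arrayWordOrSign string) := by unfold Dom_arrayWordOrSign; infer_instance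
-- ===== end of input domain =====

-- B replaces A's per-character state machine with a run-splitting loop (simpler); B also
-- returns the true segmentation on strings starting with an apostrophe (see D_).

-- ===== PORT A =====
-- one iteration of A's while loop: st = (optional pair appended this step, new wordCheck,
-- new currentWord); the trailing `if i == len(string) - 1` emit is the `rest.isEmpty` branch.
def pvLoopA (wc : Bool) (cur : List Char) : List Char → List (Bool × String)
  | [] => []
  | c :: rest =>
    let st : Option (Bool × String) × Bool × List Char :=
      if c == '\'' || PySem.Chars.isalpha c then
        if wc then (none, true, cur ++ [c])
        else (some (false, String.ofList cur), true, [c])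
      else
        if wc then (some (true, String.ofList cur), false, [c])
        else (none, false, cur ++ [c])
    let tail := if rest.isEmpty then [(st.2.1, String.ofList st.2.2)] else pvLoopA st.2.1 st.2.2 rest
    match st.1 with
    | some e => e :: tail
    | none => tail

def arrayWordOrSign (string : String) : List (Bool × String) :=
  match string.toList with
  | [] => []  -- A raises IndexError here (string[0]); excluded by Pre_
  | c :: cs => pvLoopA (PySem.Chars.isalpha c) [] (c :: cs)

-- ===== PORT B =====
def pvIsW (c : Char) : Bool := c == '\'' || PySem.Chars.isalpha c

-- B's outer `while rest:` loop; the inner scan `while n < len(rest) and wordish(rest[n]) == key`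
-- is takeWhile/dropWhile on the tail; the fuel (= remaining length, enough for every step) only
-- makes the recursion structural.
def pvGroupsF : Nat → List Char → List (Bool × String)
  | _, [] => []
  | 0, _ :: _ => []   -- never reached when fuel = length of the list
  | fuel+1, c :: cs =>
    let k := pvIsW c
    (k, String.ofList (c :: cs.takeWhile (fun d => pvIsW d == k)))
      :: pvGroupsF fuel (cs.dropWhile (fun d => pvIsW d == k))

def arrayWordOrSign_alt (string : String) : List (Bool × String) :=
  pvGroupsF string.toList.length string.toList

-- ===== PRECONDITION & SPEC =====
-- Pre_ excludes only the empty string, on which A raises IndexError.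
def Pre_arrayWordOrSign (string : String) : Prop := string ≠ ""
instance (string : String) : Decidable (Pre_arrayWordOrSign string) := by unfold Pre_arrayWordOrSign; infer_instance
def pvWitness_arrayWordOrSign : String := "ab 12c"

-- On strings starting with an apostrophe A prepends a spurious (false, "") pair (wordCheck is
-- initialised from isalpha only while the loop treats ' as word-class); B returns just the true
-- run segmentation, which is the intended value.
def D_arrayWordOrSign (string : String) : Prop := string.toList.head? = some '\''
instance (string : String) : Decidable (D_arrayWordOrSign string) := by unfold D_arrayWordOrSign; infer_instance

def Spec_arrayWordOrSign (string : String) (out : List (Bool × String)) : Prop :=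
  ¬ D_arrayWordOrSign string → out = arrayWordOrSign_alt string
instance (string : String) (out : List (Bool × String)) : Decidable (Spec_arrayWordOrSign string out) := by unfold Spec_arrayWordOrSign; infer_instance

def pvDiffWitness_arrayWordOrSign : String := "'a"
def pvDiffWitnessOut_arrayWordOrSign : (List (Bool × String)) × (List (Bool × String)) :=
  ([(false, ""), (true, "'a")], [(true, "'a")])

-- ===== CLAIM =====
def Claim_unchanged_arrayWordOrSign : Prop := ∀ (string : String), Dom_arrayWordOrSign string → Pre_arrayWordOrSign string → Spec_arrayWordOrSign string (arrayWordOrSign string)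
def Claim_changed_arrayWordOrSign : Prop := Dom_arrayWordOrSign (pvDiffWitness_arrayWordOrSign) ∧ Pre_arrayWordOrSign (pvDiffWitness_arrayWordOrSign) ∧ D_arrayWordOrSign (pvDiffWitness_arrayWordOrSign) ∧ arrayWordOrSign (pvDiffWitness_arrayWordOrSign) = pvDiffWitnessOut_arrayWordOrSign.1 ∧ arrayWordOrSign_alt (pvDiffWitness_arrayWordOrSign) = pvDiffWitnessOut_arrayWordOrSign.2 ∧ pvDiffWitnessOut_arrayWordOrSign.1 ≠ pvDiffWitnessOut_arrayWordOrSign.2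
def Claim_exact_arrayWordOrSign : Prop := ∀ (string : String), Dom_arrayWordOrSign string → Pre_arrayWordOrSign string → D_arrayWordOrSign string → arrayWordOrSign string ≠ arrayWordOrSign_alt string

-- ===== LEMMAS AND PROOFS =====

-- pvGroupsF does not depend on the fuel once the fuel covers the list
theorem pvGroupsF_fuel : ∀ (f₁ : Nat) (f₂ : Nat) (cs : List Char), cs.length ≤ f₁ → cs.length ≤ f₂ →
    pvGroupsF f₁ cs = pvGroupsF f₂ cs := by
  intro f₁
  induction f₁ with
  | zero =>
    intro f₂ cs h₁ _
    have : cs = [] := List.eq_nil_of_length_eq_zero (Nat.le_zero.mp h₁)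
    subst this; cases f₂ <;> rfl
  | succ f ih =>
    intro f₂ cs h₁ h₂
    cases cs with
    | nil => cases f₂ <;> rfl
    | cons c rest =>
      cases f₂ with
      | zero => exact absurd h₂ (by simp)
      | succ g =>
        simp only [pvGroupsF]
        refine congrArg _ (ih g _ ?_ ?_) <;>
          · have := List.length_dropWhile_le (fun d => pvIsW d == pvIsW c) rest
            simp at h₁ h₂ ⊢; omega

-- canonical fuel: pvG is what arrayWordOrSign_alt computes on a char list
def pvG (cs : List Char) : List (Bool × String) := pvGroupsF cs.length cs

theorem pvG_cons (c : Char) (cs : List Char) :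
    pvG (c :: cs) = (pvIsW c, String.ofList (c :: cs.takeWhile (fun d => pvIsW d == pvIsW c)))
      :: pvG (cs.dropWhile (fun d => pvIsW d == pvIsW c)) := by
  simp only [pvG, List.length_cons, pvGroupsF]
  refine congrArg _ (pvGroupsF_fuel _ _ _ ?_ le_rfl)
  exact List.length_dropWhile_le _ _

-- A's loop, entered with the pending run `cur` tagged `wc`, emits (wc, cur ++ the leading run of
-- wc-class chars) and then behaves like B's run splitter on what is left.
theorem pvLoopA_eq : ∀ (cs : List Char) (wc : Bool) (cur : List Char), cs ≠ [] →
    pvLoopA wc cur cs =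
      (wc, String.ofList (cur ++ cs.takeWhile (fun d => pvIsW d == wc)))
        :: pvG (cs.dropWhile (fun d => pvIsW d == wc)) := by
  intro cs
  induction cs with
  | nil => intro _ _ h; exact absurd rfl h
  | cons c rest ih =>
    intro wc cur _
    simp only [pvLoopA]
    rw [show (c == '\'' || PySem.Chars.isalpha c) = pvIsW c from rfl]
    cases hv : pvIsW c <;> cases wc <;> (try simp only [Bool.false_eq_true, eq_self_iff_true, if_false, if_true])
    · -- extend a non-word run
      cases rest with
      | nil => simp [hv, pvG, pvGroupsF]
      | cons d rest' =>
        rw [ih false (cur ++ [c]) (by simp)]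
        simp [hv]
    · -- switch word → non-word: emit (true, cur), start fresh run at c
      cases rest with
      | nil => simp [hv, pvG, pvGroupsF]
      | cons d rest' =>
        rw [ih false [c] (by simp)]
        simp [hv, pvG_cons]
    · -- switch non-word → word: emit (false, cur), start fresh run at c
      cases rest with
      | nil => simp [hv, pvG, pvGroupsF]
      | cons d rest' =>
        rw [ih true [c] (by simp)]
        simp [hv, pvG_cons]
    · -- extend a word run
      cases rest with
      | nil => simp [hv, pvG, pvGroupsF]
      | cons d rest' =>
        rw [ih true (cur ++ [c]) (by simp)]
        simp [hv]

-- ===== VERDICT =====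
theorem arrayWordOrSign_spec : Claim_unchanged_arrayWordOrSign := by
  intro s _ hpre
  intro hD
  unfold arrayWordOrSign
  have halt : arrayWordOrSign_alt s = pvG s.toList := rfl
  rw [halt]
  cases hcs : s.toList with
  | nil =>
    exact absurd (by rw [← s.ofList_toList, hcs]) hpre
  | cons c cs =>
    show pvLoopA (PySem.Chars.isalpha c) [] (c :: cs) = pvG (c :: cs)
    have hne : c ≠ '\'' := by
      intro h; apply hD; unfold D_arrayWordOrSign; rw [hcs, h]; rfl
    have hw : PySem.Chars.isalpha c = pvIsW c := by
      simp [pvIsW, hne]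
    rw [pvLoopA_eq (c :: cs) (PySem.Chars.isalpha c) [] (by simp), hw, pvG_cons]
    try simp

theorem arrayWordOrSign_changed : Claim_changed_arrayWordOrSign := by
  unfold Claim_changed_arrayWordOrSign; decide

theorem arrayWordOrSign_tight : Claim_exact_arrayWordOrSign := by
  intro s _ _ hD
  unfold D_arrayWordOrSign at hD
  unfold arrayWordOrSign
  have halt : arrayWordOrSign_alt s = pvG s.toList := rfl
  rw [halt]
  cases hcs : s.toList with
  | nil => simp [hcs] at hD
  | cons c cs =>
    rw [hcs] at hD
    have hc : c = '\'' := by simpa using hD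
    subst hc
    show pvLoopA (PySem.Chars.isalpha '\'') [] ('\'' :: cs) ≠ pvG ('\'' :: cs)
    rw [show PySem.Chars.isalpha '\'' = false from rfl,
      pvLoopA_eq ('\'' :: cs) false [] (by simp), pvG_cons]
    intro h
    have h1 := (List.cons.injEq _ _ _ _).mp h |>.1
    have hb : (false : Bool) = pvIsW '\'' := congrArg Prod.fst h1
    simp [pvIsW] at hb
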